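-- pv_equiv track=rewrite | github.com/CDAPatel/whisper-hallu-detect | whisper/hallu_detect_utils.py | replace_titles
-- ===== SOURCE A (Python) =====
-- def replace_titles(text):
--     # Dictionary of honorifics. Not complete.
--     title_dict = {
--         "Mr.": "Mister",
--         "Mrs.": "Missus",
--         "Ms.": "Miss",
--         "Dr.": "Doctor",
--         "Prof.": "Professor",
--         "Rev.": "Reverend",
--         "Sr.": "Senior",
--         "Jr.": "Junior",
--         "Hon.": "Honourable",
--         "Capt.": "Captain"
--     }
--
--     for short, full in title_dict.items():
--         text = text.replace(short, full)
--
--     return text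
-- ===== SOURCE B (Python) =====
-- def replace_titles(text):
--     # Dictionary of honorifics. Not complete.
--     title_dict = {
--         "Mr.": "Mister",
--         "Mrs.": "Missus",
--         "Ms.": "Miss",
--         "Dr.": "Doctor",
--         "Prof.": "Professor",
--         "Rev.": "Reverend",
--         "Sr.": "Senior",
--         "Jr.": "Junior",
--         "Hon.": "Honourable",
--         "Capt.": "Captain"
--     }
--
--     # Single left-to-right scan: at each position emit the expansion of the
--     # first honorific that starts here (and skip it), otherwise copy the char.
--     out = []
--     i = 0
--     n = len(text)
--     while i < n:
--         for short, full in title_dict.items():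
--             if text.startswith(short, i):
--                 out.append(full)
--                 i += len(short)
--                 break
--         else:
--             out.append(text[i])
--             i += 1
--     return "".join(out)
-- ===== Notes on version B (the rewrite author's own statement) =====
-- stated objective: alternative
-- what changed: Replaces ten sequential full-string .replace passes by one left-to-right scan that, at each position, emits the expansion of the first matching honorific and skips it (no key overlaps/straddles any other key or expansion, so one pass gives the same string).
import Mathlib
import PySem

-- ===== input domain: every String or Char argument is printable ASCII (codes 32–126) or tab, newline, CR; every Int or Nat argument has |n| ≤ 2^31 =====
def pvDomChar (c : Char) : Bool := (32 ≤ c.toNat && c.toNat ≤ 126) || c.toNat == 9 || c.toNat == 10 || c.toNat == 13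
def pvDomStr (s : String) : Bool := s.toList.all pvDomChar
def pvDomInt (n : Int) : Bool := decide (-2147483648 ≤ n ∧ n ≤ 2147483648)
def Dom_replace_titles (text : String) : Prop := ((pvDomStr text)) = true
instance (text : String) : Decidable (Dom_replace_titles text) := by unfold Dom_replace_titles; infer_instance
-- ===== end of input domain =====

-- B replaces ten sequential full-string .replace passes by one left-to-right scan that,
-- at each position, emits the expansion of the first matching honorific and skips it
-- (objective: alternative single-pass formulation; same result, proved below).

-- ===== PORT A =====
-- the dict literal, as an association list in insertion order (keys distinct)
def pvTitleDict : List (String × String) :=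
  [("Mr.", "Mister"), ("Mrs.", "Missus"), ("Ms.", "Miss"), ("Dr.", "Doctor"),
   ("Prof.", "Professor"), ("Rev.", "Reverend"), ("Sr.", "Senior"), ("Jr.", "Junior"),
   ("Hon.", "Honourable"), ("Capt.", "Captain")]

-- A: for short, full in title_dict.items(): text = text.replace(short, full)
def replace_titles (text : String) : String :=
  pvTitleDict.foldl (fun t kv => PySem.Str.replace t kv.1 kv.2) text

-- ===== PORT B =====
-- B's lookup table, on code-point lists
def pvTitlePairs : List (List Char × List Char) :=
  [("Mr.".toList, "Mister".toList), ("Mrs.".toList, "Missus".toList),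
   ("Ms.".toList, "Miss".toList), ("Dr.".toList, "Doctor".toList),
   ("Prof.".toList, "Professor".toList), ("Rev.".toList, "Reverend".toList),
   ("Sr.".toList, "Senior".toList), ("Jr.".toList, "Junior".toList),
   ("Hon.".toList, "Honourable".toList), ("Capt.".toList, "Captain".toList)]

-- B's while-loop: at each position, the first key that starts here (the for/break,
-- = List.find?) is expanded and skipped, else the char is copied; ''.join(out) is the
-- concatenation the recursion builds.  (i += len(short) is rendered as dropping
-- len(short)-1 chars of the tail, the same chars, so that the measure is length.)
def pvScan (ps : List (List Char × List Char)) : List Char → List Char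
  | [] => []
  | c :: t =>
    match ps.find? (fun kv => kv.1.isPrefixOf (c :: t)) with
    | some kv => kv.2 ++ pvScan ps (t.drop (kv.1.length - 1))
    | none => c :: pvScan ps t
termination_by l => l.length
decreasing_by
  · simp only [List.length_drop, List.length_cons]; omega
  · simp only [List.length_cons]; omega

def replace_titles_alt (text : String) : String :=
  String.ofList (pvScan pvTitlePairs text.toList)

-- ===== PRECONDITION & SPEC =====
def Spec_replace_titles (text : String) (out : String) : Prop := out = replace_titles_alt text
instance (text : String) (out : String) : Decidable (Spec_replace_titles text out) := by unfold Spec_replace_titles; infer_instance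

-- ===== CLAIM (what is proved, stated in full; the proofs are below) =====
def Claim_equal_replace_titles : Prop := ∀ (text : String), Dom_replace_titles text → Spec_replace_titles text (replace_titles text)

-- ===== LEMMAS AND PROOFS =====

-- one pass of str.replace, written as a head scan (= PySem.Chars.replace for old ≠ [])
def pvRep (old nw : List Char) : List Char → List Char
  | [] => []
  | c :: t =>
    if old.isPrefixOf (c :: t) then nw ++ pvRep old nw (t.drop (old.length - 1))
    else c :: pvRep old nw t
termination_by l => l.length
decreasing_by
  · simp only [List.length_drop, List.length_cons]; omega
  · simp only [List.length_cons]; omega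

-- unfold equations for pvScan at a cons, by the value of the find?
theorem pvScan_cons_some {ps : List (List Char × List Char)} {c : Char} {t : List Char}
    {kv : List Char × List Char}
    (h : ps.find? (fun kv => kv.1.isPrefixOf (c :: t)) = some kv) :
    pvScan ps (c :: t) = kv.2 ++ pvScan ps (t.drop (kv.1.length - 1)) := by
  rw [pvScan, h]

theorem pvScan_cons_none {ps : List (List Char × List Char)} {c : Char} {t : List Char}
    (h : ps.find? (fun kv => kv.1.isPrefixOf (c :: t)) = none) :
    pvScan ps (c :: t) = c :: pvScan ps t := by
  rw [pvScan, h]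

theorem pv_prefix_append_or {k s x : List Char} (h : k <+: s ++ x) : k <+: s ∨ s <+: k :=
  (List.prefix_or_prefix_of_prefix h (List.prefix_append s x)).imp id id

-- PySem.Chars.replace.go with enough fuel is pvRep (old ≠ [])
theorem pvGo_eq (old nw : List Char) (hold : old ≠ []) :
    ∀ fuel l acc, l.length ≤ fuel →
      PySem.Chars.replace.go old nw fuel l acc = acc.reverse ++ pvRep old nw l := by
  intro fuel
  induction fuel with
  | zero =>
    intro l acc hl
    have : l = [] := List.eq_nil_of_length_eq_zero (Nat.le_zero.mp hl)
    subst this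
    simp [PySem.Chars.replace.go, pvRep]
  | succ n ih =>
    intro l acc hl
    match l with
    | [] => simp [PySem.Chars.replace.go, pvRep]
    | c :: t =>
      rw [PySem.Chars.replace.go]
      by_cases hp : old.isPrefixOf (c :: t)
      · have hdrop : List.drop old.length (c :: t) = t.drop (old.length - 1) := by
          cases old with
          | nil => exact absurd rfl hold
          | cons a b => simp
        rw [if_pos hp, hdrop,
          ih _ _ (by simp only [List.length_drop, List.length_cons] at hl ⊢; omega)]
        rw [pvRep, if_pos hp]
        simp
      · rw [if_neg hp, ih _ _ (by simp only [List.length_cons] at hl ⊢; omega)]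
        rw [pvRep, if_neg hp]
        simp

theorem pvReplace_eq_pvRep (old nw : List Char) (hold : old ≠ []) (l : List Char) :
    PySem.Chars.replace l old nw = pvRep old nw l := by
  have he : old.isEmpty = false := by
    cases old with
    | nil => exact absurd rfl hold
    | cons a b => rfl
  rw [PySem.Chars.replace, he]
  simpa using pvGo_eq old nw hold l.length l [] (le_refl _)

-- "no nonempty suffix of w is prefix-comparable with k": k-matches cannot start inside w
def pvSkipOK (w k : List Char) : Bool :=
  w.tails.all (fun s => s.isEmpty || (!(k.isPrefixOf s) && !(s.isPrefixOf k)))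

theorem pvSkipOK_tail {c : Char} {w k : List Char} (h : pvSkipOK (c :: w) k = true) :
    pvSkipOK w k = true := by
  unfold pvSkipOK at h ⊢
  simp only [List.tails_cons, List.all_cons, Bool.and_eq_true] at h
  exact h.2

theorem pvSkipOK_self {c : Char} {w k : List Char} (h : pvSkipOK (c :: w) k = true) :
    ¬ k <+: (c :: w) ∧ ¬ (c :: w) <+: k := by
  unfold pvSkipOK at h
  simp only [List.tails_cons, List.all_cons, Bool.and_eq_true] at h
  have h1 := h.1
  simp only [List.isEmpty_cons, Bool.false_or, Bool.and_eq_true, Bool.not_eq_true'] at h1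
  constructor
  · rw [← List.isPrefixOf_iff_prefix]
    simp [h1.1]
  · rw [← List.isPrefixOf_iff_prefix]
    simp [h1.2]

-- a replace pass walks straight through an inert block w
theorem pvRep_skip (k v w : List Char) (h : pvSkipOK w k = true) (x : List Char) :
    pvRep k v (w ++ x) = w ++ pvRep k v x := by
  induction w with
  | nil => simp
  | cons c w' ih =>
    have hnp : ¬ k.isPrefixOf (c :: (w' ++ x)) = true := by
      simp only [List.isPrefixOf_iff_prefix]
      intro hk
      rw [← List.cons_append] at hk
      rcases pv_prefix_append_or hk with h1 | h1
      · exact (pvSkipOK_self h).1 h1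
      · exact (pvSkipOK_self h).2 h1
    rw [List.cons_append, pvRep, if_neg hnp, ih (pvSkipOK_tail h)]
    simp

-- the multi-key scan walks straight through a block inert for every key
theorem pvScan_skip (ps : List (List Char × List Char)) (w : List Char)
    (h : ∀ kv ∈ ps, pvSkipOK w kv.1 = true) (x : List Char) :
    pvScan ps (w ++ x) = w ++ pvScan ps x := by
  induction w with
  | nil => simp
  | cons c w' ih =>
    have hnone : ps.find? (fun kv => kv.1.isPrefixOf (c :: (w' ++ x))) = none := by
      rw [List.find?_eq_none]
      intro kv hkv
      simp only [List.isPrefixOf_iff_prefix]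
      intro hk
      rw [← List.cons_append] at hk
      rcases pv_prefix_append_or hk with h1 | h1
      · exact (pvSkipOK_self (h kv hkv)).1 h1
      · exact (pvSkipOK_self (h kv hkv)).2 h1
    rw [List.cons_append, pvScan_cons_none hnone, ih (fun kv hkv => pvSkipOK_tail (h kv hkv))]
    simp

-- "no nonempty suffix of p is prefix-comparable with v": a block of p's letters at the
-- front of the output of a (·,v)-replace pass can only come from the input
def pvStraddleFree (p v : List Char) : Bool :=
  p.tails.all (fun s => s.isEmpty || (!(s.isPrefixOf v) && !(v.isPrefixOf s)))

theorem pvStraddleFree_tail {c : Char} {p v : List Char} (h : pvStraddleFree (c :: p) v = true) :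
    pvStraddleFree p v = true := by
  unfold pvStraddleFree at h ⊢
  simp only [List.tails_cons, List.all_cons, Bool.and_eq_true] at h
  exact h.2

theorem pvStraddleFree_self {c : Char} {p v : List Char} (h : pvStraddleFree (c :: p) v = true) :
    ¬ (c :: p) <+: v ∧ ¬ v <+: (c :: p) := by
  unfold pvStraddleFree at h
  simp only [List.tails_cons, List.all_cons, Bool.and_eq_true] at h
  have h1 := h.1
  simp only [List.isEmpty_cons, Bool.false_or, Bool.and_eq_true, Bool.not_eq_true'] at h1
  constructor
  · rw [← List.isPrefixOf_iff_prefix]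
    simp [h1.1]
  · rw [← List.isPrefixOf_iff_prefix]
    simp [h1.2]

-- a key p that matches the OUTPUT of a replace pass at the front matched the input there
theorem pvPrefix_rep (k v : List Char) :
    ∀ n (x : List Char), x.length ≤ n → ∀ p : List Char, pvStraddleFree p v = true →
      p <+: pvRep k v x → p <+: x := by
  intro n
  induction n with
  | zero =>
    intro x hx p _ hp
    have : x = [] := List.eq_nil_of_length_eq_zero (Nat.le_zero.mp hx)
    subst this
    simpa [pvRep] using hp
  | succ m ih =>
    intro x hx p hsf hp
    match x with
    | [] => simpa [pvRep] using hp
    | c :: t =>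
      by_cases hk : k.isPrefixOf (c :: t)
      · rw [pvRep, if_pos hk] at hp
        match p with
        | [] => exact List.nil_prefix
        | d :: p' =>
          rcases pv_prefix_append_or hp with h1 | h1
          · exact absurd h1 (pvStraddleFree_self hsf).1
          · exact absurd h1 (pvStraddleFree_self hsf).2
      · rw [pvRep, if_neg hk] at hp
        match p with
        | [] => exact List.nil_prefix
        | d :: p' =>
          rcases List.cons_prefix_cons.mp hp with ⟨rfl, hp'⟩
          have ht : p' <+: t :=
            ih t (by simp only [List.length_cons] at hx; omega) p'
              (pvStraddleFree_tail hsf) hp'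
          exact List.cons_prefix_cons.mpr ⟨rfl, ht⟩

-- if the first key of ps matching p ++ u is p itself, this does not depend on u
theorem pvFind_stable (ps : List (List Char × List Char)) (p : List Char) (vp : List Char)
    (hpw : ps.Pairwise (fun a b => ¬ b.1 <+: a.1))
    (u : List Char)
    (hf : ps.find? (fun kv => kv.1.isPrefixOf (p ++ u)) = some (p, vp)) :
    ∀ Y, ps.find? (fun kv => kv.1.isPrefixOf (p ++ Y)) = some (p, vp) := by
  induction ps with
  | nil => simp at hf
  | cons a ps' ih =>
    intro Y
    by_cases ha : a.1.isPrefixOf (p ++ u) = true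
    · rw [List.find?_cons_of_pos (by simpa using ha)] at hf
      obtain rfl : a = (p, vp) := by simpa using hf
      exact List.find?_cons_of_pos (by simp [List.isPrefixOf_iff_prefix])
    · rw [List.find?_cons_of_neg (by simpa using ha)] at hf
      have hmem : (p, vp) ∈ ps' := List.mem_of_find?_eq_some hf
      have hnotp : ¬ p <+: a.1 := (List.pairwise_cons.mp hpw).1 (p, vp) hmem
      have hnY : ¬ a.1.isPrefixOf (p ++ Y) = true := by
        simp only [List.isPrefixOf_iff_prefix]
        intro hp
        rcases pv_prefix_append_or hp with h1 | h1
        · refine ha ?_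
          simp only [List.isPrefixOf_iff_prefix]
          exact h1.trans (List.prefix_append p u)
        · exact hnotp h1
      rw [List.find?_cons_of_neg (by simpa using hnY)]
      exact ih (List.pairwise_cons.mp hpw).2 hf Y

-- all the concrete side conditions of one fusion step, as one decidable check
def pvStepOK (k v : List Char) (ps : List (List Char × List Char)) : Bool :=
  !k.isEmpty &&
  ps.all (fun p => !p.1.isEmpty && pvStraddleFree p.1 v && pvSkipOK p.1 k && pvSkipOK v p.1) &&
  decide (ps.Pairwise (fun a b => ¬ b.1 <+: a.1))

-- fusion: one replace pass, then the scan with the remaining keys,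
-- is the scan with the key added in front
theorem pvStep (k v : List Char) (ps : List (List Char × List Char))
    (h : pvStepOK k v ps = true) :
    ∀ x, pvScan ps (pvRep k v x) = pvScan ((k, v) :: ps) x := by
  have hk : k ≠ [] := by
    unfold pvStepOK at h
    simp only [Bool.and_eq_true] at h
    cases k with
    | nil => simp at h
    | cons a b => simp
  have hps : ∀ kv ∈ ps, kv.1 ≠ [] ∧ pvStraddleFree kv.1 v = true ∧ pvSkipOK kv.1 k = true ∧
      pvSkipOK v kv.1 = true := by
    intro kv hkv
    unfold pvStepOK at h
    simp only [Bool.and_eq_true, List.all_eq_true] at h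
    have h2 := h.1.2 kv hkv
    simp only [Bool.not_eq_true', List.isEmpty_eq_false_iff] at h2
    exact ⟨h2.1.1.1, h2.1.1.2, h2.1.2, h2.2⟩
  have hpw : ps.Pairwise (fun a b => ¬ b.1 <+: a.1) := by
    unfold pvStepOK at h
    simp only [Bool.and_eq_true, decide_eq_true_eq] at h
    exact h.2
  have main : ∀ n x, x.length ≤ n → pvScan ps (pvRep k v x) = pvScan ((k, v) :: ps) x := by
    intro n
    induction n with
    | zero =>
      intro x hx
      have : x = [] := List.eq_nil_of_length_eq_zero (Nat.le_zero.mp hx)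
      subst this
      simp [pvRep, pvScan]
    | succ m ih =>
      intro x hx
      match x with
      | [] => simp [pvRep, pvScan]
      | c :: t =>
        by_cases hkp : k.isPrefixOf (c :: t) = true
        · -- the new key matches at the front
          have hfc : ((k, v) :: ps).find? (fun kv => kv.1.isPrefixOf (c :: t)) = some (k, v) :=
            List.find?_cons_of_pos (by simpa using hkp)
          rw [pvRep, if_pos hkp,
            pvScan_skip ps v (fun kv hkv => (hps kv hkv).2.2.2),
            ih (t.drop (k.length - 1))
              (by simp only [List.length_drop, List.length_cons] at hx ⊢; omega),
            pvScan_cons_some hfc]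
        · cases hf : ps.find? (fun kv => kv.1.isPrefixOf (c :: t)) with
          | some kv =>
            -- some later key matches at the front
            obtain ⟨p, vp⟩ := kv
            have hppre : p <+: (c :: t) := by
              have := List.find?_some hf
              simpa [List.isPrefixOf_iff_prefix] using this
            have hpmem : (p, vp) ∈ ps := List.mem_of_find?_eq_some hf
            obtain ⟨u, hu⟩ := hppre
            have hpne : p ≠ [] := (hps _ hpmem).1
            have hrep : pvRep k v (c :: t) = p ++ pvRep k v u := by
              rw [← hu, pvRep_skip k v p (hps _ hpmem).2.2.1]
            have hfY := pvFind_stable ps p vp hpw u (by rw [hu]; exact hf)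
            have hfcons : ((k, v) :: ps).find? (fun kv => kv.1.isPrefixOf (c :: t)) =
                some (p, vp) := by
              rw [List.find?_cons_of_neg (by simpa using hkp)]
              exact hf
            have hulen : u.length ≤ m := by
              have hlen := congrArg List.length hu
              simp only [List.length_append, List.length_cons] at hlen
              simp only [List.length_cons] at hx
              cases p with
              | nil => exact absurd rfl hpne
              | cons d p' => simp only [List.length_cons] at hlen; omega
            match p, hpne, hu, hrep, hfY, hfcons with
            | d :: p', _, hu, hrep, hfY, hfcons =>
              rw [hrep, List.cons_append]
              have hfind := hfY (pvRep k v u)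
              rw [List.cons_append] at hfind
              rw [pvScan_cons_some hfind]
              simp only [List.length_cons, Nat.add_sub_cancel, List.drop_left]
              rw [ih u hulen, pvScan_cons_some hfcons]
              have hcd : p' ++ u = t := by
                rw [List.cons_append] at hu
                injection hu with h1 h2
              rw [← hcd]
              simp only [List.length_cons, Nat.add_sub_cancel, List.drop_left]
          | none =>
            -- no key matches at the front
            have hnone2 : ps.find? (fun kv => kv.1.isPrefixOf (c :: pvRep k v t)) = none := by
              rw [List.find?_eq_none]
              intro kv hkv
              simp only [List.isPrefixOf_iff_prefix]
              intro hpre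
              have hpre2 : kv.1 <+: pvRep k v (c :: t) := by
                rw [pvRep, if_neg hkp]; exact hpre
              have hx2 : kv.1 <+: (c :: t) :=
                pvPrefix_rep k v (c :: t).length (c :: t) (le_refl _) kv.1
                  (hps kv hkv).2.1 hpre2
              have hn := List.find?_eq_none.mp hf kv hkv
              simp only [List.isPrefixOf_iff_prefix] at hn
              exact hn hx2
            have hfn : ((k, v) :: ps).find? (fun kv => kv.1.isPrefixOf (c :: t)) = none := by
              rw [List.find?_cons_of_neg (by simpa using hkp)]
              exact hf
            rw [pvRep, if_neg hkp, pvScan_cons_none hnone2,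
              ih t (by simp only [List.length_cons] at hx; omega),
              pvScan_cons_none hfn]
  exact fun x => main x.length x (le_refl _)

theorem pvScan_nil_keys : ∀ x : List Char, pvScan [] x = x := by
  intro x
  induction x with
  | nil => simp [pvScan]
  | cons c t ih => rw [pvScan_cons_none (by simp), ih]

-- the ten fused steps: A's sequential passes equal B's one scan, on char lists
theorem pvChain_eq_scan (x : List Char) :
    (pvTitlePairs.foldl (fun s kv => pvRep kv.1 kv.2 s) x) = pvScan pvTitlePairs x := by
  simp only [pvTitlePairs, List.foldl_cons, List.foldl_nil]
  rw [← pvStep _ _ _ (by decide)]  -- "Mr."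
  rw [← pvStep _ _ _ (by decide)]  -- "Mrs."
  rw [← pvStep _ _ _ (by decide)]  -- "Ms."
  rw [← pvStep _ _ _ (by decide)]  -- "Dr."
  rw [← pvStep _ _ _ (by decide)]  -- "Prof."
  rw [← pvStep _ _ _ (by decide)]  -- "Rev."
  rw [← pvStep _ _ _ (by decide)]  -- "Sr."
  rw [← pvStep _ _ _ (by decide)]  -- "Jr."
  rw [← pvStep _ _ _ (by decide)]  -- "Hon."
  rw [← pvStep _ _ _ (by decide)]  -- "Capt."
  rw [pvScan_nil_keys]

-- ===== VERDICT (by name: the statement is the Claim_ definition above) =====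
theorem replace_titles_spec : Claim_equal_replace_titles := by
  intro text _
  unfold Spec_replace_titles replace_titles replace_titles_alt
  simp only [pvTitleDict, List.foldl_cons, List.foldl_nil]
  simp only [PySem.Str.replace, String.toList_ofList]
  rw [pvReplace_eq_pvRep _ _ (by decide), pvReplace_eq_pvRep _ _ (by decide),
    pvReplace_eq_pvRep _ _ (by decide), pvReplace_eq_pvRep _ _ (by decide),
    pvReplace_eq_pvRep _ _ (by decide), pvReplace_eq_pvRep _ _ (by decide),
    pvReplace_eq_pvRep _ _ (by decide), pvReplace_eq_pvRep _ _ (by decide),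
    pvReplace_eq_pvRep _ _ (by decide), pvReplace_eq_pvRep _ _ (by decide)]
  have hc := pvChain_eq_scan text.toList
  simp only [pvTitlePairs, List.foldl_cons, List.foldl_nil] at hc
  rw [hc]
  simp only [pvTitlePairs]
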